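-- pv_equiv track=rewrite | github.com/please-build/python-rules | tools/checksum_fetcher/checksum_fetcher.py | map_version_assets
-- ===== SOURCE A (Python) =====
-- from typing import OrderedDict
--
-- def map_version_assets(raw: dict[str, dict[str, list[str]]]) -> dict[str, list[str]]:
--     """
--     map_version_assets takes the result of parse_api_response and returns
--     a dict of version to asset paths.
--
--     Args:
--         raw: Return value of parse_api_response.
--
--     Returns:
--         A dict of version to asset paths.
--     """
--     # Multiple releases can provide the same version of the interpreter; to
--     # avoid duplicates, we keep only the last occurrence, so we need the dict
--     # to be sorted beforehand.
--     d = OrderedDict(sorted(raw.items(), reverse=True))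
--
--     uniq: set[str] = set()
--     va: dict[str, list[str]] = {}
--
--     for release_name, values in d.items():
--         for version, assets in values.items():
--             # Skip versions we already saw or those with an empty asset list.
--             if not assets or version in uniq:
--                 continue
--
--             va[version] = [f"{release_name}/{asset}" for asset in assets]
--             uniq.add(version)
--
--     return va
-- ===== SOURCE B (Python) =====
-- def map_version_assets(raw):
--     """
--     map_version_assets takes the result of parse_api_response and returns
--     a dict of version to asset paths.
--
--     Two-pass rewrite: first index, per version, the best (lexicographically
--     greatest) release name offering a non-empty asset list; then walk the
--     releases in descending name order and emit each version exactly at its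
--     best release.  No seen-set is needed.
--     """
--     best: dict[str, str] = {}
--     for release_name, values in raw.items():
--         for version, assets in values.items():
--             if assets and (version not in best or best[version] < release_name):
--                 best[version] = release_name
--
--     va: dict[str, list[str]] = {}
--     for release_name, values in sorted(raw.items(), reverse=True):
--         for version, assets in values.items():
--             if assets and best.get(version) == release_name:
--                 va[version] = [f"{release_name}/{asset}" for asset in assets]
--     return va
-- ===== Notes on version B (the rewrite author's own statement) =====
-- stated objective: alternative
-- what changed: Replaces the seen-set first-occurrence dedup inside the single pass with two passes: an unsorted pass building a best-release index (max release name per version with non-empty assets) and an emit pass over the descending-sorted releases that keeps a version exactly at its best release; Pre_ only requires distinct keys at both levels, which is automatic for the Python dict arguments.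
import Mathlib
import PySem

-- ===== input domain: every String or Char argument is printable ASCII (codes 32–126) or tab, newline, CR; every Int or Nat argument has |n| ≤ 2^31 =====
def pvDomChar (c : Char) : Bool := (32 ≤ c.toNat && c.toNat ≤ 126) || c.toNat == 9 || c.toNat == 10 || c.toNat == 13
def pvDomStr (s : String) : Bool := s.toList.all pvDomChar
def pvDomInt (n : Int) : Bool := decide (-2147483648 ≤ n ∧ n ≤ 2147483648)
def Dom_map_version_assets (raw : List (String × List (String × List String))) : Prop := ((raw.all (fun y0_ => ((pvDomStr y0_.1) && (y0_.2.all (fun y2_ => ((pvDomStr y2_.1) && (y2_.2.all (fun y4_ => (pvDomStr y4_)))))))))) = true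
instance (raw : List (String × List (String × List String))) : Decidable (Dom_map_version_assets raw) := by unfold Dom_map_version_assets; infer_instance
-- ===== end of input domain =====

-- B replaces A's seen-set dedup in one sorted pass by two passes: an unsorted pass indexing each
-- version's best (max-named) release with non-empty assets, then an emit pass over the sorted
-- releases keeping each version exactly at its best release; equivalence of return values is proved
-- on association lists with distinct keys at both levels (automatic for the Python dict arguments).

-- ===== PORT A =====
-- one step of A's inner loop: skip empty asset lists and already-seen versions, else record
def aStep (rel : String) (st : PySem.Set String × PySem.Dict String (List String))
    (p : String × List String) : PySem.Set String × PySem.Dict String (List String) :=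
  if p.2.isEmpty || PySem.Set.contains st.1 p.1 then st
  else (PySem.Set.add st.1 p.1, st.2.insert p.1 (p.2.map (fun a => rel ++ "/" ++ a)))

-- A's body of 'for release_name, values in d.items()'
def aRel (st : PySem.Set String × PySem.Dict String (List String))
    (rv : String × List (String × List String)) : PySem.Set String × PySem.Dict String (List String) :=
  rv.2.foldl (aStep rv.1) st

def map_version_assets (raw : List (String × List (String × List String))) : List (String × List String) :=
  -- sorted(raw.items(), reverse=True): Python's tuple comparison never reaches the second
  -- component when the keys are distinct (Pre_), so sorting by the key is exact there
  let d := PySem.List.sorted raw (fun rv => rv.1) true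
  let res := d.foldl aRel (PySem.Set.empty, PySem.Dict.empty)
  res.2.items

-- ===== PORT B =====
-- one step of B's first pass: best[version] = max release name offering non-empty assets
def bBestStep (rel : String) (b : PySem.Dict String String) (p : String × List String) :
    PySem.Dict String String :=
  if !p.2.isEmpty && (b.get? p.1).all (fun r => decide (r < rel)) then b.insert p.1 rel else b

def bBest (raw : List (String × List (String × List String))) : PySem.Dict String String :=
  raw.foldl (fun b rv => rv.2.foldl (bBestStep rv.1) b) PySem.Dict.empty

-- one step of B's emit pass: keep (version, assets) exactly at its best release
def bEmitStep (best : PySem.Dict String String) (rel : String)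
    (va : PySem.Dict String (List String)) (p : String × List String) :
    PySem.Dict String (List String) :=
  if !p.2.isEmpty && (best.get? p.1 == some rel) then
    va.insert p.1 (p.2.map (fun a => rel ++ "/" ++ a))
  else va

def map_version_assets_alt (raw : List (String × List (String × List String))) : List (String × List String) :=
  let best := bBest raw
  let va := (PySem.List.sorted raw (fun rv => rv.1) true).foldl
    (fun va rv => rv.2.foldl (bEmitStep best rv.1) va) PySem.Dict.empty
  va.items

-- ===== PRECONDITION & SPEC =====
-- Pre_ excludes only association lists with duplicate keys at either level: the Python argument is a
-- dict of dicts, which such lists do not represent (a dict's keys are unique), and their reading is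
-- therefore not specified by A.
def Pre_map_version_assets (raw : List (String × List (String × List String))) : Prop :=
  (raw.map Prod.fst).Nodup ∧ ∀ rv ∈ raw, (rv.2.map Prod.fst).Nodup
instance (raw : List (String × List (String × List String))) : Decidable (Pre_map_version_assets raw) := by unfold Pre_map_version_assets; infer_instance

def pvWitness_map_version_assets : (List (String × List (String × List String))) :=
  [("r1", [("3.9", ["a.tgz"]), ("3.8", [])]), ("r0", [("3.9", ["b.tgz"])])]

def Spec_map_version_assets (raw : List (String × List (String × List String))) (out : List (String × List String)) : Prop := out = map_version_assets_alt raw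
instance (raw : List (String × List (String × List String))) (out : List (String × List String)) : Decidable (Spec_map_version_assets raw out) := by unfold Spec_map_version_assets; infer_instance

-- ===== CLAIM (what is proved, stated in full; the proofs are below) =====
def Claim_equal_map_version_assets : Prop := ∀ (raw : List (String × List (String × List String))), Dom_map_version_assets raw → Pre_map_version_assets raw → Spec_map_version_assets raw (map_version_assets raw)

-- ===== LEMMAS AND PROOFS =====

-- 'release rv offers version v with a non-empty asset list'
def covered (values : List (String × List String)) (v : String) : Bool :=
  values.any (fun p => p.1 == v && !p.2.isEmpty)

def covL (X : List (String × List (String × List String))) (v : String) : Bool :=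
  X.any (fun rv => covered rv.2 v)

-- the max-combine of B's first pass, as a function on the looked-up value
def push (o : Option String) (rel : String) : Option String :=
  match o with
  | none => some rel
  | some r => if r < rel then some rel else some r

def bspecStep (v : String) (o : Option String) (rv : String × List (String × List String)) :
    Option String :=
  if covered rv.2 v then push o rv.1 else o


lemma contains_add (s : PySem.Set String) (x y : String) :
    PySem.Set.contains (PySem.Set.add s x) y = (PySem.Set.contains s y || y == x) := by
  simp only [PySem.Set.add, PySem.Set.contains]
  by_cases hm : y ∈ s <;> by_cases he : y = x <;>
    split <;> simp_all [List.contains_eq_mem]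

lemma push_swap (a b : String) : push (some a) b = push (some b) a := by
  rcases lt_trichotomy a b with h | h | h
  · simp [push, h, lt_asymm h]
  · subst h; rfl
  · simp [push, h, lt_asymm h]

lemma push_push (o : Option String) (a b : String) :
    push (push o a) b = push (push o b) a := by
  cases o with
  | none => simpa [push] using push_swap a b
  | some r =>
    by_cases h1 : r < a <;> by_cases h2 : r < b
    · simp only [push, if_pos h1, if_pos h2]; exact push_swap a b
    · have hab : ¬ a < b := fun h => h2 (lt_trans h1 h)
      simp [push, h1, h2, hab]
    · have hba : ¬ b < a := fun h => h1 (lt_trans h2 h)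
      simp [push, h1, h2, hba]
    · simp [push, h1, h2]

lemma bspecStep_comm (v : String) (z : Option String)
    (x y : String × List (String × List String)) :
    bspecStep v (bspecStep v z x) y = bspecStep v (bspecStep v z y) x := by
  cases hx : covered x.2 v <;> cases hy : covered y.2 v <;>
    simp [bspecStep, hx, hy, push_push]

lemma foldl_comm_perm {α β : Type} (f : β → α → β)
    (hf : ∀ z x y, f (f z x) y = f (f z y) x) :
    ∀ {l₁ l₂ : List α}, l₁.Perm l₂ → ∀ b, l₁.foldl f b = l₂.foldl f b := by
  intro l₁ l₂ p
  induction p with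
  | nil => intro b; rfl
  | cons x _ ih => intro b; rw [List.foldl_cons, List.foldl_cons, ih]
  | swap x y l => intro b; rw [List.foldl_cons, List.foldl_cons, List.foldl_cons, List.foldl_cons, hf]
  | trans _ _ ih₁ ih₂ => intro b; rw [ih₁, ih₂]

lemma get?_foldl_bBestStep (rel v : String) :
    ∀ (values : List (String × List String)) (b : PySem.Dict String String),
      ((values.foldl (bBestStep rel) b).get? v)
        = if covered values v then push (b.get? v) rel else b.get? v := by
  intro values
  induction values with
  | nil => intro b; simp [covered]
  | cons p t ih =>
    intro b
    rw [List.foldl_cons, ih]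
    by_cases hv : p.1 = v
    · subst hv
      cases he : p.2.isEmpty with
      | true =>
        have hstep : bBestStep rel b p = b := by simp [bBestStep, he]
        have hcov : covered (p :: t) p.1 = covered t p.1 := by
          simp [covered, List.any_cons, he]
        rw [hstep, hcov]
      | false =>
        have hcov : covered (p :: t) p.1 = true := by
          simp [covered, List.any_cons, he]
        rw [hcov]
        cases hb' : b.get? p.1 with
        | none =>
          have hstep : bBestStep rel b p = b.insert p.1 rel := by
            simp [bBestStep, he, hb']
          rw [hstep]
          simp [PySem.Dict.get?_insert, hb', push]
        | some r =>
          by_cases hlt : r < rel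
          · have hcond : (!p.2.isEmpty && (b.get? p.1).all (fun r => decide (r < rel))) = true := by
              rw [hb', he]
              show (true && decide (r < rel)) = true
              rw [decide_eq_true hlt]
              rfl
            have hstep : bBestStep rel b p = b.insert p.1 rel := by
              unfold bBestStep; rw [if_pos hcond]
            rw [hstep]
            simp [PySem.Dict.get?_insert, hb', push, hlt]
          · have hcond : (!p.2.isEmpty && (b.get? p.1).all (fun r => decide (r < rel))) = false := by
              rw [hb', he]
              show (true && decide (r < rel)) = false
              rw [decide_eq_false hlt]
              rfl
            have hstep : bBestStep rel b p = b := by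
              unfold bBestStep; rw [if_neg (by rw [hcond]; simp)]
            rw [hstep]
            simp [hb', push, hlt]
    · have hcov : covered (p :: t) v = covered t v := by
        simp [covered, List.any_cons, beq_eq_false_iff_ne.mpr hv]
      have hget : (bBestStep rel b p).get? v = b.get? v := by
        unfold bBestStep
        split
        · rw [PySem.Dict.get?_insert]; simp [Ne.symm hv]
        · rfl
      rw [hcov, hget]

lemma get?_bBest (raw : List (String × List (String × List String))) (v : String) :
    (bBest raw).get? v = raw.foldl (bspecStep v) none := by
  have aux : ∀ (X : List (String × List (String × List String))) (b : PySem.Dict String String),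
      ((X.foldl (fun b rv => rv.2.foldl (bBestStep rv.1) b) b).get? v)
        = X.foldl (bspecStep v) (b.get? v) := by
    intro X
    induction X with
    | nil => intro b; rfl
    | cons rv t ih =>
      intro b
      rw [List.foldl_cons, List.foldl_cons, ih, get?_foldl_bBestStep]
      rfl
  unfold bBest
  rw [aux, PySem.Dict.get?_empty]

lemma bspec_skip (v : String) :
    ∀ (X : List (String × List (String × List String))) (o : Option String),
      covL X v = false → X.foldl (bspecStep v) o = o := by
  intro X
  induction X with
  | nil => intro o _; rfl
  | cons x t ih =>
    intro o h
    have h' : (covered x.2 v || covL t v) = false := h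
    rcases Bool.or_eq_false_iff.mp h' with ⟨h1, h2⟩
    rw [List.foldl_cons]
    have hstep : bspecStep v o x = o := by simp [bspecStep, h1]
    rw [hstep]
    exact ih o h2

lemma bspec_keep (v r : String) :
    ∀ (X : List (String × List (String × List String))),
      (∀ k ∈ X.map Prod.fst, k < r) → X.foldl (bspecStep v) (some r) = some r := by
  intro X
  induction X with
  | nil => intro _; rfl
  | cons x t ih =>
    intro h
    rw [List.foldl_cons]
    have hx : x.1 < r := h x.1 (by simp)
    have hstep : bspecStep v (some r) x = some r := by
      simp [bspecStep, push, lt_asymm hx]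
    rw [hstep]
    exact ih (fun k hk => h k (by simp [hk]))

lemma bspec_some_mem (v : String) :
    ∀ (X : List (String × List (String × List String))) (r : String),
      ∃ r', X.foldl (bspecStep v) (some r) = some r'
        ∧ (r' = r ∨ r' ∈ X.map Prod.fst) := by
  intro X
  induction X with
  | nil => intro r; exact ⟨r, rfl, Or.inl rfl⟩
  | cons x t ih =>
    intro r
    rw [List.foldl_cons]
    cases hc : covered x.2 v with
    | false =>
      have hstep : bspecStep v (some r) x = some r := by simp [bspecStep, hc]
      rw [hstep]
      obtain ⟨r', h1, h2⟩ := ih r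
      refine ⟨r', h1, ?_⟩
      rcases h2 with h | h
      · exact Or.inl h
      · exact Or.inr (by simp [h])
    | true =>
      by_cases hlt : r < x.1
      · have hstep : bspecStep v (some r) x = some x.1 := by
          simp [bspecStep, push, hc, hlt]
        rw [hstep]
        obtain ⟨r', h1, h2⟩ := ih x.1
        refine ⟨r', h1, Or.inr ?_⟩
        rcases h2 with h | h
        · simp [h]
        · simp [h]
      · have hstep : bspecStep v (some r) x = some r := by
          simp [bspecStep, push, hc, hlt]
        rw [hstep]
        obtain ⟨r', h1, h2⟩ := ih r
        refine ⟨r', h1, ?_⟩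
        rcases h2 with h | h
        · exact Or.inl h
        · exact Or.inr (by simp [h])

lemma bspec_cov (v : String) :
    ∀ (X : List (String × List (String × List String))),
      covL X v = true →
      ∃ r, X.foldl (bspecStep v) none = some r ∧ r ∈ X.map Prod.fst := by
  intro X
  induction X with
  | nil => intro h; simp [covL] at h
  | cons x t ih =>
    intro h
    rw [List.foldl_cons]
    cases hc : covered x.2 v with
    | true =>
      have hstep : bspecStep v none x = some x.1 := by simp [bspecStep, hc, push]
      rw [hstep]
      obtain ⟨r', h1, h2⟩ := bspec_some_mem v t x.1
      refine ⟨r', h1, ?_⟩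
      rcases h2 with h | h
      · simp [h]
      · simp [h]
    | false =>
      have hstep : bspecStep v none x = none := by simp [bspecStep, hc]
      rw [hstep]
      have h' : (covered x.2 v || covL t v) = true := h
      have ht : covL t v = true := by simpa [hc] using h'
      obtain ⟨r, h1, h2⟩ := ih ht
      exact ⟨r, h1, by simp [h2]⟩

lemma contains_foldl_aStep (rel w : String) :
    ∀ (values : List (String × List String)) (uniq : PySem.Set String)
      (va : PySem.Dict String (List String)),
      PySem.Set.contains (values.foldl (aStep rel) (uniq, va)).1 w
        = (PySem.Set.contains uniq w || covered values w) := by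
  intro values
  induction values with
  | nil => intro u va; simp [covered]
  | cons p t ih =>
    intro u va
    rw [List.foldl_cons]
    by_cases hc : (p.2.isEmpty || PySem.Set.contains u p.1) = true
    · have hstep : aStep rel (u, va) p = (u, va) := by
        unfold aStep; dsimp only; rw [if_pos hc]
      rw [hstep, ih]
      cases hpw : (p.1 == w && !p.2.isEmpty) with
      | false => simp [covered, List.any_cons, hpw]
      | true =>
        obtain ⟨hp1, hemp⟩ : p.1 = w ∧ p.2.isEmpty = false := by simpa using hpw
        have hcu : PySem.Set.contains u p.1 = true := by
          cases h : PySem.Set.contains u p.1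
          · rw [hemp, h] at hc; simp at hc
          · rfl
        have hwu : PySem.Set.contains u w = true := hp1 ▸ hcu
        rw [hwu]
        simp
    · have hc' : (p.2.isEmpty || PySem.Set.contains u p.1) = false := by simpa using hc
      rcases Bool.or_eq_false_iff.mp hc' with ⟨hemp, _⟩
      have hstep : aStep rel (u, va) p
          = (PySem.Set.add u p.1, va.insert p.1 (p.2.map (fun a => rel ++ "/" ++ a))) := by
        unfold aStep; dsimp only; rw [if_neg (by rw [hc']; simp)]
      rw [hstep, ih, contains_add]
      have hcomm : (p.1 == w) = (w == p.1) := by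
        by_cases h : p.1 = w
        · simp [h]
        · simp [beq_eq_false_iff_ne.mpr h, beq_eq_false_iff_ne.mpr (Ne.symm h)]
      simp [covered, List.any_cons, hemp, hcomm, Bool.or_assoc]

lemma inner_eq (best : PySem.Dict String String) (rel : String) :
    ∀ (values : List (String × List String)) (uniq : PySem.Set String)
      (va : PySem.Dict String (List String)),
      (values.map Prod.fst).Nodup →
      (∀ p ∈ values, p.2 ≠ [] →
        (PySem.Set.contains uniq p.1 = false ↔ best.get? p.1 = some rel)) →
      (values.foldl (aStep rel) (uniq, va)).2 = values.foldl (bEmitStep best rel) va := by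
  intro values
  induction values with
  | nil => intro u va _ _; rfl
  | cons p t ih =>
    intro u va hnd hiff
    have hndt : (t.map Prod.fst).Nodup := (List.nodup_cons.mp hnd).2
    have hnp : p.1 ∉ t.map Prod.fst := (List.nodup_cons.mp hnd).1
    rw [List.foldl_cons, List.foldl_cons]
    cases he : p.2.isEmpty with
    | true =>
      have hcond : (p.2.isEmpty || PySem.Set.contains u p.1) = true := by rw [he]; rfl
      have h1 : aStep rel (u, va) p = (u, va) := by
        unfold aStep; dsimp only; rw [if_pos hcond]
      have h2 : bEmitStep best rel va p = va := by
        unfold bEmitStep; rw [if_neg (by rw [he]; simp)]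
      rw [h1, h2]
      exact ih u va hndt (fun q hq hqe => hiff q (by simp [hq]) hqe)
    | false =>
      have hne : p.2 ≠ [] := by intro h; rw [h] at he; simp at he
      have hif := hiff p (by simp) hne
      by_cases hc : PySem.Set.contains u p.1 = true
      · have hnotsome : ¬ best.get? p.1 = some rel := by
          intro h
          rw [hif.mpr h] at hc
          cases hc
        have hbf : (best.get? p.1 == some rel) = false := beq_eq_false_iff_ne.mpr hnotsome
        have hct : PySem.Set.contains u p.1 = true := hc
        have hcond : (p.2.isEmpty || PySem.Set.contains u p.1) = true := by rw [he, hct]; rfl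
        have h1 : aStep rel (u, va) p = (u, va) := by
          unfold aStep; dsimp only; rw [if_pos hcond]
        have h2 : bEmitStep best rel va p = va := by
          unfold bEmitStep; rw [if_neg (by rw [hbf]; simp)]
        rw [h1, h2]
        exact ih u va hndt (fun q hq hqe => hiff q (by simp [hq]) hqe)
      · have hcf : PySem.Set.contains u p.1 = false := by simpa using hc
        have hsome : best.get? p.1 = some rel := hif.mp hcf
        have hcond : (p.2.isEmpty || PySem.Set.contains u p.1) = false := by rw [he, hcf]; rfl
        have h1 : aStep rel (u, va) p
            = (PySem.Set.add u p.1, va.insert p.1 (p.2.map (fun a => rel ++ "/" ++ a))) := by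
          unfold aStep; dsimp only; rw [if_neg (by rw [hcond]; simp)]
        have hbt : (best.get? p.1 == some rel) = true := by rw [hsome]; simp
        have h2 : bEmitStep best rel va p
            = va.insert p.1 (p.2.map (fun a => rel ++ "/" ++ a)) := by
          unfold bEmitStep; rw [if_pos (by rw [he, hbt]; rfl)]
        rw [h1, h2]
        apply ih _ _ hndt
        intro q hq hqe
        have hqp : q.1 ≠ p.1 := by
          intro h
          exact hnp (List.mem_map.mpr ⟨q, hq, h⟩)
        rw [contains_add]
        simp only [beq_eq_false_iff_ne.mpr hqp, Bool.or_false]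
        exact hiff q (by simp [hq]) hqe

set_option maxHeartbeats 1000000 in
lemma main_eq (best : PySem.Dict String String) :
    ∀ (R P : List (String × List (String × List String))) (uniq : PySem.Set String)
      (va : PySem.Dict String (List String)),
      (∀ v, best.get? v = (P ++ R).foldl (bspecStep v) none) →
      ((P ++ R).map Prod.fst).Pairwise (fun a b => b < a) →
      (∀ rv ∈ R, (rv.2.map Prod.fst).Nodup) →
      (∀ v, PySem.Set.contains uniq v = covL P v) →
      (R.foldl aRel (uniq, va)).2
        = R.foldl (fun va rv => rv.2.foldl (bEmitStep best rv.1) va) va := by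
  intro R
  induction R with
  | nil => intro P u va _ _ _ _; rfl
  | cons rv R' ih =>
    intro P u va hb hSD hIN hinv
    have hSD' := hSD
    rw [List.map_append, List.pairwise_append] at hSD'
    have hcross := hSD'.2.2
    have hR' : ∀ c ∈ R'.map Prod.fst, c < rv.1 := by
      have h2 := hSD'.2.1
      rw [List.map_cons, List.pairwise_cons] at h2
      exact h2.1
    have hiff : ∀ p ∈ rv.2, p.2 ≠ [] →
        (PySem.Set.contains u p.1 = false ↔ best.get? p.1 = some rv.1) := by
      intro p hp hne
      have hbv := hb p.1
      rw [List.foldl_append] at hbv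
      cases hcovP : covL P p.1 with
      | true =>
        obtain ⟨r, hr, hrmem⟩ := bspec_cov p.1 P hcovP
        have hkeep : ((rv :: R').foldl (bspecStep p.1) (some r)) = some r :=
          bspec_keep p.1 r (rv :: R') (fun k hk => hcross r hrmem k hk)
        rw [hr, hkeep] at hbv
        have hlt : rv.1 < r := hcross r hrmem rv.1 (by simp)
        rw [hinv p.1, hcovP, hbv]
        constructor
        · intro h; cases h
        · intro h
          exact absurd (Option.some.inj h) (ne_of_gt hlt)
      | false =>
        have hnone : P.foldl (bspecStep p.1) none = none := bspec_skip p.1 P none hcovP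
        rw [hnone, List.foldl_cons] at hbv
        have hemp : p.2.isEmpty = false := by
          cases h2 : p.2.isEmpty
          · rfl
          · exact absurd (List.isEmpty_iff.mp h2) hne
        have hcov1 : covered rv.2 p.1 = true := by
          simp only [covered, List.any_eq_true]
          exact ⟨p, hp, by simp [hemp]⟩
        have hhd : bspecStep p.1 none rv = some rv.1 := by simp [bspecStep, hcov1, push]
        rw [hhd, bspec_keep p.1 rv.1 R' hR'] at hbv
        rw [hinv p.1, hcovP, hbv]
        simp
    have hinner := inner_eq best rv.1 rv.2 u va (hIN rv (by simp)) hiff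
    have hfst : ∀ w, PySem.Set.contains (rv.2.foldl (aStep rv.1) (u, va)).1 w
        = covL (P ++ [rv]) w := by
      intro w
      rw [contains_foldl_aStep, hinv w]
      simp [covL, List.any_append, List.any_cons]
    have happ := ih (P ++ [rv]) (rv.2.foldl (aStep rv.1) (u, va)).1
        (rv.2.foldl (aStep rv.1) (u, va)).2
        (by simpa using hb) (by simpa using hSD)
        (fun x hx => hIN x (by simp [hx])) hfst
    rw [Prod.mk.eta] at happ
    rw [List.foldl_cons, List.foldl_cons]
    show (R'.foldl aRel (rv.2.foldl (aStep rv.1) (u, va))).2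
        = R'.foldl (fun va rv => rv.2.foldl (bEmitStep best rv.1) va)
            (rv.2.foldl (bEmitStep best rv.1) va)
    rw [happ, hinner]

-- ===== VERDICT (by name: the statement is the Claim_ definition above) =====
theorem map_version_assets_spec : Claim_equal_map_version_assets := by
  intro raw _hdom hpre
  unfold Spec_map_version_assets
  have hperm : (PySem.List.sorted raw (fun rv => rv.1) true).Perm raw :=
    PySem.List.sorted_perm raw (fun rv => rv.1) true
  have hb : ∀ v, (bBest raw).get? v
      = (([] : List (String × List (String × List String)))
          ++ PySem.List.sorted raw (fun rv => rv.1) true).foldl (bspecStep v) none := by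
    intro v
    rw [List.nil_append]
    exact (get?_bBest raw v).trans (foldl_comm_perm _ (bspecStep_comm v) hperm.symm none)
  have hnd : ((PySem.List.sorted raw (fun rv => rv.1) true).map Prod.fst).Nodup :=
    ((hperm.map Prod.fst).nodup_iff).mpr hpre.1
  have hnd' : ((PySem.List.sorted raw (fun rv => rv.1) true).map Prod.fst).Pairwise (· ≠ ·) := hnd
  have hle := PySem.List.sorted_pairwise_rev raw (fun rv => rv.1)
  have hne : (PySem.List.sorted raw (fun rv => rv.1) true).Pairwise (fun a b => a.1 ≠ b.1) :=
    List.pairwise_map.mp hnd'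
  have hSD : ((PySem.List.sorted raw (fun rv => rv.1) true).map Prod.fst).Pairwise
      (fun a b => b < a) := by
    rw [List.pairwise_map]
    exact List.Pairwise.imp (fun h => lt_of_le_of_ne h.1 (Ne.symm h.2)) (hle.and hne)
  have hIN : ∀ rv ∈ PySem.List.sorted raw (fun rv => rv.1) true, (rv.2.map Prod.fst).Nodup :=
    fun rv h => hpre.2 rv ((PySem.List.mem_sorted raw (fun rv => rv.1) true rv).mp h)
  have hmain := main_eq (bBest raw) (PySem.List.sorted raw (fun rv => rv.1) true) []
      PySem.Set.empty PySem.Dict.empty hb (by simpa using hSD) hIN (fun v => rfl)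
  show map_version_assets raw = map_version_assets_alt raw
  unfold map_version_assets map_version_assets_alt
  exact congrArg PySem.Dict.items hmain
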